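-- pv_equiv track=rewrite | github.com/webster-yuan/python-startup | startup/algorithm/classify/dp/select_path.py | min_energy_consumption_dp
-- ===== SOURCE A (Python) =====
-- def min_energy_consumption_dp(a: list[int], b: list[int], k):
--     """
--     dp
--     状态定义： dp[i][cnt]代表的就是从第i次开始选择，A选择已经连续使用了cnt次的，到达终点的最低能耗
--     状态转移：dp[i][cnt] = min(
--                         a[i]+dp[i+1][cnt+1] if cnt <k,
--                         b[i]+dp[i+1][0]
--                         )
--     初始化： if i == m: 也就是选完最后一次之后，最小能耗是0，这个本不属于整体逻辑计算之内，
--         但是为了避免单独对最后一次进行处理，所以多开一行，并将最后一行设置为0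
--
--     依赖关系：i：上依赖于下，所以是从下往上遍历，
--     dp[i][cnt] 依赖于dp[i+1][0]，dp[i+1][cnt+1]，不存在同行依赖，只需要保证是从下往上的，那么下面那一行的肯定都是算好的
--     所以遍历顺序随便
--     注意：cnt属于[0,k],所以要开k+1个空间
--     """
--     m = len(a)
--     dp = [[0] * (k + 1) for _ in range(m + 1)] # 初始化的是第m行
--     for i in range(m - 1, -1, -1):
--         for j in range(k + 1):
--             if j >= k:
--                 # 选b
--                 dp[i][j] = dp[i + 1][0] + b[i]
--             else:
--                 dp[i][j] = min(a[i] + dp[i + 1][j + 1], b[i] + dp[i + 1][0])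
--
--     return dp[0][0]
-- ===== SOURCE B (Python) =====
-- def min_energy_consumption_dp(a: list[int], b: list[int], k):
--     # Run-based 1-D DP (alternative to the 2-D table): e[i] = min cost from index i with no consecutive-a run
--     # pending; from i we take t consecutive a's (t <= k), then either pick b
--     # at i+t (resetting the run) or reach the end.
--     m = len(a)
--     e = [0] * (m + 1)
--     for i in range(m - 1, -1, -1):
--         s = 0                      # sum of a[i .. i+t-1]
--         best = b[i] + e[i + 1]     # t = 0: pick b immediately
--         t = 1
--         while t <= k and i + t <= m:
--             s += a[i + t - 1]
--             best = min(best, s + (b[i + t] + e[i + t + 1] if i + t < m else 0))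
--             t += 1
--         e[i] = best
--     return e[0]
-- ===== Notes on version B (the rewrite author's own statement) =====
-- stated objective: alternative
-- what changed: Replaces the (m+1)x(k+1) bottom-up DP table with a run-based 1-D DP: e[i] is the min cost from index i, computed by trying each run of t<=k consecutive a's followed by a b or the end, using O(m) space and O(m*min(k,m)) time.
import Mathlib
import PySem

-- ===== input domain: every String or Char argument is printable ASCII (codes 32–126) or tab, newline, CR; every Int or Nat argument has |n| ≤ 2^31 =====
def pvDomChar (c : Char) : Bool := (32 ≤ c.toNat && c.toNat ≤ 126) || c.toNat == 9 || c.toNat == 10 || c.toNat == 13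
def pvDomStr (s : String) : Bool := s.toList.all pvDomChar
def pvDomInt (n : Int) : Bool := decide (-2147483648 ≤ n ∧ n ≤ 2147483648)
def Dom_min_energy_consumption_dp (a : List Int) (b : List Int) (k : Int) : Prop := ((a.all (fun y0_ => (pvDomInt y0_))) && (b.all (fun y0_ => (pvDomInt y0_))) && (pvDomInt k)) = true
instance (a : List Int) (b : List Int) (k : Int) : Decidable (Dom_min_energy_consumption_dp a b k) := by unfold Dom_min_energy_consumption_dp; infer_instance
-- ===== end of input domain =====

-- B replaces A's (m+1)×(k+1) bottom-up table with a run-based 1-D DP over a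
-- single array e (from each index take t ≤ k consecutive a's, then a b or the
-- end); objective: alternative (same result, different algorithm).

-- ===== PORT A =====
def min_energy_consumption_dp (a : List Int) (b : List Int) (k : Int) : Int :=
  let m := a.length
  let dp : List (List Int) := (List.range (m + 1)).map (fun _ => List.replicate (k + 1).toNat 0)
  let dp := (PySem.List.pyRange ((m : Int) - 1) (-1) (-1)).foldl (fun dp i =>
      (PySem.List.pyRange 0 (k + 1) 1).foldl (fun dp j =>
        dp.set i.toNat ((dp.getD i.toNat []).set j.toNat
          (if j ≥ k then
            (dp.getD (i.toNat + 1) []).getD 0 0 + b.getD i.toNat 0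
           else
            min (a.getD i.toNat 0 + (dp.getD (i.toNat + 1) []).getD (j.toNat + 1) 0)
                (b.getD i.toNat 0 + (dp.getD (i.toNat + 1) []).getD 0 0)))) dp) dp
  (dp.getD 0 []).getD 0 0

-- ===== PORT B =====
-- the `while t <= k and i + t <= m` loop; fuel = m - i suffices: fuel hits 0
-- only when t = m - i + 1, where the loop condition is false anyway
def pvBWhile (a b e : List Int) (k : Int) (i m : Nat) : Nat → Nat → Int → Int → Int
  | 0, _, _, best => best
  | fuel + 1, t, s, best =>
    if (t : Int) ≤ k ∧ i + t ≤ m then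
      let s' := s + a.getD (i + t - 1) 0
      let best' := min best (s' + (if i + t < m then b.getD (i + t) 0 + e.getD (i + t + 1) 0 else 0))
      pvBWhile a b e k i m fuel (t + 1) s' best'
    else best

def min_energy_consumption_dp_alt (a : List Int) (b : List Int) (k : Int) : Int :=
  let m := a.length
  let e : List Int := List.replicate (m + 1) 0
  let e := (PySem.List.pyRange ((m : Int) - 1) (-1) (-1)).foldl (fun e i =>
      e.set i.toNat (pvBWhile a b e k i.toNat m (m - i.toNat) 1 0
        (b.getD i.toNat 0 + e.getD (i.toNat + 1) 0))) e
  e.getD 0 0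

-- ===== PRECONDITION & SPEC =====
-- Pre: exactly where the Python A returns: k < 0 makes dp[0][0] an IndexError
-- (rows of length k+1 ≤ 0), and b shorter than a makes b[i] an IndexError.
def Pre_min_energy_consumption_dp (a : List Int) (b : List Int) (k : Int) : Prop :=
  0 ≤ k ∧ a.length ≤ b.length
instance (a : List Int) (b : List Int) (k : Int) : Decidable (Pre_min_energy_consumption_dp a b k) := by
  unfold Pre_min_energy_consumption_dp; infer_instance

def pvWitness_min_energy_consumption_dp : List Int × List Int × Int := ([1, 2, 3], [2, 1, 4], 1)

def Spec_min_energy_consumption_dp (a : List Int) (b : List Int) (k : Int) (out : Int) : Prop :=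
  out = min_energy_consumption_dp_alt a b k
instance (a : List Int) (b : List Int) (k : Int) (out : Int) : Decidable (Spec_min_energy_consumption_dp a b k out) := by
  unfold Spec_min_energy_consumption_dp; infer_instance

-- ===== CLAIM (what is proved, stated in full; the proofs are below) =====
def Claim_equal_min_energy_consumption_dp : Prop := ∀ (a : List Int) (b : List Int) (k : Int), Dom_min_energy_consumption_dp a b k → Pre_min_energy_consumption_dp a b k → Spec_min_energy_consumption_dp a b k (min_energy_consumption_dp a b k)
-- ===== LEMMAS AND PROOFS =====

def pvMdp (a b : List Int) (kN m : Nat) : Nat → Nat → Int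
  | 0, _ => 0
  | n + 1, j =>
    if kN ≤ j then b.getD (m - (n + 1)) 0 + pvMdp a b kN m n 0
    else min (a.getD (m - (n + 1)) 0 + pvMdp a b kN m n (j + 1))
             (b.getD (m - (n + 1)) 0 + pvMdp a b kN m n 0)
def pvSumA (a : List Int) : Nat → Nat → Int
  | _, 0 => 0
  | i, t + 1 => a.getD i 0 + pvSumA a (i + 1) t
def pvTail (a b : List Int) (kN m p : Nat) : Int :=
  if p < m then b.getD p 0 + pvMdp a b kN m (m - (p + 1)) 0 else 0
def pvTerm (a b : List Int) (kN m i t : Nat) : Int := pvSumA a i t + pvTail a b kN m (i + t)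
def pvMinT (a b : List Int) (kN m i : Nat) : Nat → Int
  | 0 => pvTerm a b kN m i 0
  | T + 1 => min (pvMinT a b kN m i T) (pvTerm a b kN m i (T + 1))
theorem pvTerm_shift (a b : List Int) (kN m i t : Nat) :
    pvTerm a b kN m i (t + 1) = a.getD i 0 + pvTerm a b kN m (i + 1) t := by
  show pvSumA a i (t+1) + pvTail a b kN m (i + (t+1)) = _
  have h1 : i + (t + 1) = (i + 1) + t := by omega
  simp only [pvSumA, pvTerm, h1]; ring
theorem pvMinT_cons (a b : List Int) (kN m i T : Nat) :
    min (pvTerm a b kN m i 0) (a.getD i 0 + pvMinT a b kN m (i + 1) T)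
      = pvMinT a b kN m i (T + 1) := by
  induction T with
  | zero => simp only [pvMinT, pvTerm_shift]
  | succ T ih =>
    simp only [pvMinT]
    rw [show a.getD i 0 + min (pvMinT a b kN m (i+1) T) (pvTerm a b kN m (i+1) (T+1))
          = min (a.getD i 0 + pvMinT a b kN m (i+1) T) (a.getD i 0 + pvTerm a b kN m (i+1) (T+1))
        from (min_add_add_left _ _ _).symm]
    rw [← min_assoc, ih, ← pvTerm_shift]; rfl

-- term 0 at i < m is the b-branch
theorem pvTerm_zero (a b : List Int) (kN m i : Nat) (hi : i < m) :
    pvTerm a b kN m i 0 = b.getD i 0 + pvMdp a b kN m (m - (i + 1)) 0 := by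
  simp [pvTerm, pvSumA, pvTail, hi]

theorem pvMdp_unroll (a b : List Int) (kN m : Nat) :
    ∀ n j, 1 ≤ n → n ≤ m → j ≤ kN →
      pvMdp a b kN m n j = pvMinT a b kN m (m - n) (min (kN - j) n) := by
  intro n
  induction n with
  | zero => omega
  | succ n ih =>
    intro j _ hnm hj
    have e1 : m - (m - (n + 1) + 1) = n := by omega
    by_cases hkj : kN ≤ j
    · have hj' : j = kN := le_antisymm hj hkj
      rw [hj']
      have h0 : min (kN - kN) (n + 1) = 0 := by omega
      rw [h0]
      show _ = pvTerm a b kN m (m - (n + 1)) 0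
      rw [pvTerm_zero a b kN m (m - (n + 1)) (by omega), e1]
      simp only [pvMdp, if_pos (le_refl kN)]
    · have hjk : j < kN := lt_of_not_ge hkj
      simp only [pvMdp, if_neg hkj]
      have hT : min (kN - j) (n + 1) = min (kN - (j + 1)) n + 1 := by omega
      rw [hT, ← pvMinT_cons, pvTerm_zero a b kN m (m - (n + 1)) (by omega), e1]
      have hidx : m - (n + 1) + 1 = m - n := by omega
      rw [hidx]
      cases Nat.eq_zero_or_pos n with
      | inl hn0 =>
        subst hn0
        have hmin0 : min (kN - (j + 1)) 0 = 0 := by omega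
        rw [hmin0]
        show min (a.getD (m-1) 0 + pvMdp a b kN m 0 (j+1)) (b.getD (m-1) 0 + pvMdp a b kN m 0 0)
           = min (b.getD (m-1) 0 + pvMdp a b kN m 0 0) (a.getD (m-1) 0 + pvTerm a b kN m (m - 0) 0)
        have ht0 : pvTerm a b kN m (m - 0) 0 = 0 := by
          simp [pvTerm, pvSumA, pvTail]
        rw [ht0]
        simp only [pvMdp]
        exact min_comm _ _
      | inr hn1 =>
        rw [ih (j + 1) hn1 (by omega) (by omega)]
        exact min_comm _ _

theorem pyRangeDown_cons (n : Nat) :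
    PySem.List.pyRange (n : Int) (-1) (-1) = (n : Int) :: PySem.List.pyRange ((n : Int) - 1) (-1) (-1) := by
  have key : ∀ (v : Int), (-1 : Int) < v →
      PySem.List.pyRange v (-1) (-1) = v :: PySem.List.pyRange (v - 1) (-1) (-1) := by
    intro v hv
    simp only [PySem.List.pyRange]
    norm_num
    rw [if_pos hv]
    by_cases h0 : (0 : Int) < v
    · rw [if_pos h0]
      have hc1 : (v + 1).toNat = v.toNat + 1 := by omega
      rw [hc1, List.range_succ_eq_map, List.map_cons, List.map_map]
      congr 1
      · norm_num
      apply List.map_congr_left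
      intro x _
      simp [Function.comp]
      ring
    · have hv0 : v = 0 := by omega
      subst hv0; decide
  exact key (n : Int) (by omega)

theorem pvSumA_succ_right (a : List Int) (i t : Nat) :
    pvSumA a i (t + 1) = pvSumA a i t + a.getD (i + t) 0 := by
  induction t generalizing i with
  | zero => simp [pvSumA]
  | succ t ih =>
    show a.getD i 0 + pvSumA a (i+1) (t+1) = (a.getD i 0 + pvSumA a (i+1) t) + a.getD (i + (t+1)) 0
    rw [ih (i+1), Nat.add_comm t 1, ← Nat.add_assoc, Nat.add_comm i 1]
    ring

theorem pvBWhile_eq (a b e : List Int) (kN m i : Nat) (hi : i < m)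
    (he : ∀ r, i < r → r ≤ m → e.getD r 0 = pvMdp a b kN m (m - r) 0) :
    ∀ fuel t s best, 1 ≤ t → fuel + t = m - i + 1 → t - 1 ≤ kN → t - 1 ≤ m - i →
      s = pvSumA a i (t - 1) → best = pvMinT a b kN m i (t - 1) →
      pvBWhile a b e (kN : Int) i m fuel t s best = pvMinT a b kN m i (min kN (m - i)) := by
  intro fuel
  induction fuel with
  | zero =>
    intro t s best ht hf htk htm hs hbest
    have : t - 1 = m - i := by omega
    rw [pvBWhile, hbest, this, Nat.min_eq_right (by omega : m - i ≤ kN)]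
  | succ fuel ih =>
    intro t s best ht hf htk htm hs hbest
    rw [pvBWhile]
    by_cases hc : (t : Int) ≤ (kN : Int) ∧ i + t ≤ m
    · rw [if_pos hc]
      have htk' : t ≤ kN := by exact_mod_cast hc.1
      have htm' : i + t ≤ m := hc.2
      have hs' : s + a.getD (i + t - 1) 0 = pvSumA a i t := by
        rw [hs]
        have : i + t - 1 = i + (t - 1) := by omega
        rw [this]
        have : t = (t - 1) + 1 := by omega
        rw [this, pvSumA_succ_right]
        simp
      have htail : (if i + t < m then b.getD (i + t) 0 + e.getD (i + t + 1) 0 else 0)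
          = pvTail a b kN m (i + t) := by
        by_cases him : i + t < m
        · rw [if_pos him, pvTail, if_pos him, he (i + t + 1) (by omega) (by omega)]
        · rw [if_neg him, pvTail, if_neg him]
      have hbest' : min best (s + a.getD (i + t - 1) 0 +
            (if i + t < m then b.getD (i + t) 0 + e.getD (i + t + 1) 0 else 0))
          = pvMinT a b kN m i t := by
        rw [htail, hs', hbest]
        have : t = (t - 1) + 1 := by omega
        rw [this]
        show min (pvMinT a b kN m i (t-1)) (pvSumA a i ((t-1)+1) + pvTail a b kN m (i + ((t-1)+1))) = _
        rfl
      show pvBWhile a b e (↑kN) i m fuel (t + 1) (s + a.getD (i + t - 1) 0)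
          (min best (s + a.getD (i + t - 1) 0 +
            (if i + t < m then b.getD (i + t) 0 + e.getD (i + t + 1) 0 else 0))) = _
      exact ih (t + 1) _ _ (by omega) (by omega) (by omega) (by omega)
        (by simpa using hs') (by simpa using hbest')
    · rw [if_neg hc]
      have : ¬ (t ≤ kN ∧ i + t ≤ m) := by
        intro h; exact hc ⟨by exact_mod_cast h.1, h.2⟩
      have hstop : t - 1 = min kN (m - i) := by omega
      rw [hbest, hstop]

theorem pvGetD_set_self {α : Type} (l : List α) (i : Nat) (v d : α) (h : i < l.length) :
    (l.set i v).getD i d = v := by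
  simp [List.getD, h]
theorem pvGetD_set_ne {α : Type} (l : List α) (i r : Nat) (v d : α) (h : r ≠ i) :
    (l.set i v).getD r d = l.getD r d := by
  simp [List.getD, List.getElem?_set_ne (by omega : i ≠ r)]

def pvRow (a b : List Int) (kN m i : Nat) : List Int :=
  (List.range (kN + 1)).map (fun j => pvMdp a b kN m (m - i) j)

theorem alt_outer (a b : List Int) (kN : Nat) :
    ∀ i, i ≤ a.length → ∀ e : List Int, e.length = a.length + 1 →
      (∀ r, i ≤ r → r ≤ a.length → e.getD r 0 = pvMdp a b kN a.length (a.length - r) 0) →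
      (((PySem.List.pyRange ((i : Int) - 1) (-1) (-1)).foldl (fun e i =>
        e.set i.toNat (pvBWhile a b e (kN : Int) i.toNat a.length (a.length - i.toNat) 1 0
          (b.getD i.toNat 0 + e.getD (i.toNat + 1) 0))) e)).getD 0 0
        = pvMdp a b kN a.length a.length 0 := by
  intro i
  induction i with
  | zero =>
    intro _ e _ he
    have h0 : PySem.List.pyRange ((0 : Nat) - 1 : Int) (-1) (-1) = [] := by decide
    rw [show ((0 : Nat) : Int) - 1 = ((0 : Nat) - 1 : Int) from by norm_num, h0]
    simpa using he 0 (Nat.le_refl 0) (Nat.zero_le _)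
  | succ i ih =>
    intro hi e hlen he
    have hcast : ((i + 1 : Nat) : Int) - 1 = ((i : Nat) : Int) := by push_cast; ring
    rw [hcast, pyRangeDown_cons i, List.foldl_cons]
    have him : i < a.length := hi
    set m := a.length with hm
    -- the value written at index i
    have hval : pvBWhile a b e (kN : Int) ((i : Int)).toNat m (m - ((i : Int)).toNat) 1 0
        (b.getD ((i : Int)).toNat 0 + e.getD (((i : Int)).toNat + 1) 0) = pvMdp a b kN m (m - i) 0 := by
      rw [Int.toNat_natCast]
      have he' : ∀ r, i < r → r ≤ m → e.getD r 0 = pvMdp a b kN m (m - r) 0 := by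
        intro r h1 h2; exact he r (by omega) h2
      have hb0 : b.getD i 0 + e.getD (i + 1) 0 = pvMinT a b kN m i 0 := by
        rw [he (i + 1) (by omega) (by omega)]
        show _ = pvTerm a b kN m i 0
        rw [pvTerm_zero a b kN m i him]
      rw [pvBWhile_eq a b e kN m i him he' (m - i) 1 0 _ (Nat.le_refl 1) (by omega)
        (by omega) (by omega) rfl (by rw [hb0])]
      rw [pvMdp_unroll a b kN m (m - i) 0 (by omega) (by omega) (Nat.zero_le _),
        show m - (m - i) = i from by omega, Nat.sub_zero]
    rw [Int.toNat_natCast] at hval ⊢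
    rw [hval]
    apply ih (by omega)
    · simpa using hlen
    · intro r h1 h2
      by_cases hr : r = i
      · subst hr
        exact pvGetD_set_self e r _ 0 (by omega)
      · rw [pvGetD_set_ne e i r _ 0 hr]
        exact he r (by omega) h2

theorem alt_eq_mdp (a b : List Int) (kN : Nat) :
    min_energy_consumption_dp_alt a b (kN : Int) = pvMdp a b kN a.length a.length 0 := by
  show (((PySem.List.pyRange ((a.length : Int) - 1) (-1) (-1)).foldl (fun e i =>
        e.set i.toNat (pvBWhile a b e (kN : Int) i.toNat a.length (a.length - i.toNat) 1 0
          (b.getD i.toNat 0 + e.getD (i.toNat + 1) 0))) (List.replicate (a.length + 1) 0))).getD 0 0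
      = pvMdp a b kN a.length a.length 0
  apply alt_outer a b kN a.length (Nat.le_refl _) _ (by simp)
  intro r h1 h2
  have hr : r = a.length := by omega
  subst hr
  rw [List.getD_replicate 0 (by omega), Nat.sub_self]
  rfl

def pvPartial (a b : List Int) (kN m i j : Nat) : List Int :=
  (List.range (kN + 1)).map (fun j' => if j' < j then pvMdp a b kN m (m - i) j' else 0)

theorem pvPartial_zero (a b : List Int) (kN m i : Nat) :
    pvPartial a b kN m i 0 = List.replicate (kN + 1) 0 := by
  simp [pvPartial, List.map_const']

theorem pvPartial_full (a b : List Int) (kN m i : Nat) :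
    pvPartial a b kN m i (kN + 1) = pvRow a b kN m i := by
  apply List.map_congr_left
  intro x hx
  rw [if_pos (List.mem_range.mp hx)]

theorem pvPartial_set (a b : List Int) (kN m i j : Nat) (hj : j ≤ kN) :
    (pvPartial a b kN m i j).set j (pvMdp a b kN m (m - i) j) = pvPartial a b kN m i (j + 1) := by
  apply List.ext_getElem (by simp [pvPartial])
  intro n h1 h2
  simp only [pvPartial, List.getElem_set, List.getElem_map, List.getElem_range]
  by_cases hnj : j = n
  · subst hnj
    simp
  · rw [if_neg hnj]
    by_cases hlt : n < j
    · rw [if_pos hlt, if_pos (by omega)]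
    · rw [if_neg hlt, if_neg (by omega)]

theorem a_inner (a b : List Int) (kN m iN : Nat) (hi : iN < m)
    (dp : List (List Int)) (hlen : dp.length = m + 1)
    (hnext : dp.getD (iN + 1) [] = pvRow a b kN m (iN + 1))
    (hrow : dp.getD iN [] = List.replicate (kN + 1) 0) :
    ∀ jN, jN ≤ kN + 1 →
      (PySem.List.pyRange 0 (jN : Int) 1).foldl (fun dp j =>
        dp.set iN ((dp.getD iN []).set j.toNat
          (if j ≥ (kN : Int) then
            (dp.getD (iN + 1) []).getD 0 0 + b.getD iN 0
           else
            min (a.getD iN 0 + (dp.getD (iN + 1) []).getD (j.toNat + 1) 0)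
                (b.getD iN 0 + (dp.getD (iN + 1) []).getD 0 0)))) dp
      = dp.set iN (pvPartial a b kN m iN jN) := by
  intro jN
  induction jN with
  | zero =>
    intro _
    have h0 : PySem.List.pyRange 0 ((0 : Nat) : Int) 1 = [] := by decide
    rw [h0, List.foldl_nil, pvPartial_zero, ← hrow,
      List.getD_eq_getElem dp [] (by omega)]
    exact (List.set_getElem_self (by omega)).symm
  | succ jN ih =>
    intro _
    have hcast : ((jN + 1 : Nat) : Int) = ((jN : Nat) : Int) + 1 := by push_cast; ring
    rw [hcast, PySem.List.pyRange_one_succ_right (Int.natCast_nonneg jN), List.foldl_append,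
      ih (by omega), List.foldl_cons, List.foldl_nil]
    rw [pvGetD_set_self dp iN _ [] (by omega), pvGetD_set_ne dp iN (iN + 1) _ [] (by omega),
      hnext, Int.toNat_natCast, List.set_set]
    have hval : (if ((jN : Nat) : Int) ≥ (kN : Int) then
            (pvRow a b kN m (iN + 1)).getD 0 0 + b.getD iN 0
           else
            min (a.getD iN 0 + (pvRow a b kN m (iN + 1)).getD (jN + 1) 0)
                (b.getD iN 0 + (pvRow a b kN m (iN + 1)).getD 0 0))
        = pvMdp a b kN m (m - iN) jN := by
      have hmi : m - iN = (m - (iN + 1)) + 1 := by omega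
      have hidx : m - ((m - (iN + 1)) + 1) = iN := by omega
      by_cases hkj : kN ≤ jN
      · have hjk : jN = kN := by omega
        rw [if_pos (by exact_mod_cast hkj)]
        simp only [pvRow]
        rw [PySem.List.getD_map_range _ _ _ _ (by omega), hmi]
        show _ = pvMdp a b kN m ((m - (iN + 1)) + 1) jN
        rw [hjk]
        simp only [pvMdp, if_pos (le_refl kN), hidx]
        ring
      · rw [if_neg (by exact_mod_cast hkj)]
        simp only [pvRow]
        rw [PySem.List.getD_map_range _ _ _ _ (by omega),
          PySem.List.getD_map_range _ _ _ _ (by omega), hmi]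
        show _ = pvMdp a b kN m ((m - (iN + 1)) + 1) jN
        simp only [pvMdp, if_neg hkj, hidx]
    rw [hval, pvPartial_set a b kN m iN jN (by omega)]

theorem a_outer (a b : List Int) (kN : Nat) :
    ∀ i, i ≤ a.length → ∀ dp : List (List Int), dp.length = a.length + 1 →
      (∀ r, r ≤ a.length →
        dp.getD r [] = if i ≤ r then pvRow a b kN a.length r else List.replicate (kN + 1) 0) →
      ((((PySem.List.pyRange ((i : Int) - 1) (-1) (-1)).foldl (fun dp i =>
          (PySem.List.pyRange 0 ((kN : Int) + 1) 1).foldl (fun dp j =>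
            dp.set i.toNat ((dp.getD i.toNat []).set j.toNat
              (if j ≥ (kN : Int) then
                (dp.getD (i.toNat + 1) []).getD 0 0 + b.getD i.toNat 0
               else
                min (a.getD i.toNat 0 + (dp.getD (i.toNat + 1) []).getD (j.toNat + 1) 0)
                    (b.getD i.toNat 0 + (dp.getD (i.toNat + 1) []).getD 0 0)))) dp) dp)).getD 0 []).getD 0 0
      = pvMdp a b kN a.length a.length 0 := by
  intro i
  induction i with
  | zero =>
    intro _ dp _ hr
    have h0 : PySem.List.pyRange ((0 : Nat) - 1 : Int) (-1) (-1) = [] := by decide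
    rw [show ((0 : Nat) : Int) - 1 = ((0 : Nat) - 1 : Int) from by norm_num, h0, List.foldl_nil]
    rw [hr 0 (Nat.zero_le _), if_pos (Nat.le_refl 0)]
    simp only [pvRow]
    rw [PySem.List.getD_map_range _ _ _ _ (by omega), Nat.sub_zero]
  | succ i ih =>
    intro hi dp hlen hr
    have hcast : ((i + 1 : Nat) : Int) - 1 = ((i : Nat) : Int) := by push_cast; ring
    rw [hcast, pyRangeDown_cons i, List.foldl_cons]
    simp only [Int.toNat_natCast]
    have hkcast : ((kN + 1 : Nat) : Int) = (kN : Int) + 1 := by push_cast; ring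
    rw [← hkcast]
    rw [a_inner a b kN a.length i (by omega) dp hlen
      (by rw [hr (i + 1) (by omega), if_pos (by omega)])
      (by rw [hr i (by omega), if_neg (by omega)])
      (kN + 1) (Nat.le_refl _)]
    rw [pvPartial_full]
    apply ih (by omega)
    · simpa using hlen
    · intro r hrm
      by_cases hri : r = i
      · subst hri
        rw [pvGetD_set_self dp r _ [] (by omega), if_pos (Nat.le_refl r)]
      · rw [pvGetD_set_ne dp i r _ [] hri, hr r hrm]
        by_cases hir : i ≤ r
        · rw [if_pos hir, if_pos (by omega)]
        · rw [if_neg hir, if_neg (by omega)]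

theorem pvRow_last (a b : List Int) (kN m : Nat) :
    pvRow a b kN m m = List.replicate (kN + 1) 0 := by
  simp only [pvRow, Nat.sub_self]
  simp [pvMdp, List.map_const']

theorem a_eq_mdp (a b : List Int) (kN : Nat) :
    min_energy_consumption_dp a b (kN : Int) = pvMdp a b kN a.length a.length 0 := by
  simp only [min_energy_consumption_dp]
  have htn : ((kN : Int) + 1).toNat = kN + 1 := by omega
  rw [htn]
  apply a_outer a b kN a.length (Nat.le_refl _) _ (by simp)
  intro r hrm
  rw [PySem.List.getD_map_range _ _ _ _ (by omega)]
  by_cases hr : a.length ≤ r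
  · rw [if_pos hr, show r = a.length from by omega, pvRow_last]
  · rw [if_neg hr]

-- ===== VERDICT (by name: the statement is the Claim_ definition above) =====
theorem min_energy_consumption_dp_spec : Claim_equal_min_energy_consumption_dp := by
  intro a b k _ hpre
  obtain ⟨hk, _⟩ := hpre
  unfold Spec_min_energy_consumption_dp
  have hkk : k = (k.toNat : Int) := (Int.toNat_of_nonneg hk).symm
  rw [hkk, a_eq_mdp, alt_eq_mdp]
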